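-- pv_equiv track=rewrite | github.com/cperryresearch/pc-msat-audit-interface | state_constructor/src/state_logic.py | apply_persistence_acceptance
-- ===== SOURCE A (Python) =====
-- def apply_persistence_acceptance(
--     candidate_points: list[dict],
--     min_run: int,
-- ) -> list[dict]:
--     if min_run < 1:
--         raise ValueError("min_run must be >= 1")
--
--     resolved_points = [dict(point) for point in candidate_points]
--
--     run_start = 0
--
--     while run_start < len(resolved_points):
--         run_candidate = resolved_points[run_start].get("candidate_state")
--         run_end = run_start + 1
--
--         while run_end < len(resolved_points):
--             next_candidate = resolved_points[run_end].get("candidate_state")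
--             if next_candidate != run_candidate:
--                 break
--             run_end += 1
--
--         run_length = run_end - run_start
--
--         for idx in range(run_start, run_end):
--             if run_candidate is None:
--                 resolved_points[idx]["state"] = None
--                 resolved_points[idx]["support_status"] = "unassigned"
--             elif run_length >= min_run:
--                 resolved_points[idx]["state"] = run_candidate
--                 resolved_points[idx]["support_status"] = "accepted"
--             else:
--                 resolved_points[idx]["state"] = None
--                 resolved_points[idx]["support_status"] = "withheld"
--
--         run_start = run_end
--
--     return resolved_points
-- ===== SOURCE B (Python) =====
-- def _resolve(key, run_len, min_run, p):
--     if key is None: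
--         p["state"] = None
--         p["support_status"] = "unassigned"
--     elif run_len >= min_run:
--         p["state"] = key
--         p["support_status"] = "accepted"
--     else:
--         p["state"] = None
--         p["support_status"] = "withheld"
--     return p
--
--
-- def apply_persistence_acceptance(
--     candidate_points: list[dict],
--     min_run: int,
-- ) -> list[dict]:
--     if min_run < 1:
--         raise ValueError("min_run must be >= 1")
--
--     points = [dict(p) for p in candidate_points]
--     keys = [p.get("candidate_state") for p in points]
--     n = len(points)
--
--     # left[i]: length of the equal-key run ending at i
--     left = [0] * n
--     for i in range(n):
--         left[i] = left[i - 1] + 1 if i > 0 and keys[i] == keys[i - 1] else 1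
--
--     # right[i]: length of the equal-key run starting at i
--     right = [0] * n
--     for i in range(n - 1, -1, -1):
--         right[i] = right[i + 1] + 1 if i < n - 1 and keys[i] == keys[i + 1] else 1
--
--     # maximal run length containing i is left[i] + right[i] - 1
--     return [_resolve(k, l + r - 1, min_run, p)
--             for p, k, l, r in zip(points, keys, left, right)]
-- ===== Notes on version B (the rewrite author's own statement) =====
-- stated objective: alternative
-- what changed: Instead of A's nested while-loops that delimit each maximal run and re-walk it by index, B never finds run boundaries: it computes each point's maximal run length per index as left[i]+right[i]-1 from two dynamic-programming scans (run ending at i, run starting at i) and resolves every point independently in a final zip pass.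
import Mathlib
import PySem

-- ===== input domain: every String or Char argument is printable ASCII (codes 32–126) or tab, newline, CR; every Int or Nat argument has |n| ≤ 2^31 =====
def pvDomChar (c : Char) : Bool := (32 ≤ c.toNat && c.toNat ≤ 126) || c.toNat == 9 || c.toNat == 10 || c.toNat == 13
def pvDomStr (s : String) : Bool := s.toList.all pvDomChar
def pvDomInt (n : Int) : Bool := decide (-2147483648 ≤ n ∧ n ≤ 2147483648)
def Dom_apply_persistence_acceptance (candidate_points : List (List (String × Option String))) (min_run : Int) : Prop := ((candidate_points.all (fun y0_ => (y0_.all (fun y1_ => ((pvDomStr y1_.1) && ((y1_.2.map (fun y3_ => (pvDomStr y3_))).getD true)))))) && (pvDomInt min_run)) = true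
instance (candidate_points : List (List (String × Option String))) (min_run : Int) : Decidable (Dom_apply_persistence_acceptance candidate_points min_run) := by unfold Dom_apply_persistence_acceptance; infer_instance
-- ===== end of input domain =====

-- B never delimits runs: it computes each point's maximal-run length per index as
-- left[i] + right[i] - 1 via two dynamic-programming scans (alternative algorithm, same cost);
-- equivalence is on the return value (A copies every dict first, so nothing observable is mutated).

-- ===== PORT A =====
-- a dict point, as the Python dicts are
abbrev PvPt := PySem.Dict String (Option String)

-- point.get("candidate_state")  (missing key and value None both give none, as Python's .get)
def pvCand (d : PvPt) : Option String := (PySem.Dict.get? d "candidate_state").getD none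

-- inner while loop: advance run_end while the candidate matches (fuel makes it total;
-- it is called with fuel = length of the list, always enough)
def aFindRunEnd (pts : List PvPt) (run_candidate : Option String) (fuel run_end : Nat) : Nat :=
  match fuel with
  | 0 => run_end
  | f + 1 =>
    if run_end < pts.length then
      if pvCand (pts.getD run_end PySem.Dict.empty) ≠ run_candidate then run_end
      else aFindRunEnd pts run_candidate f (run_end + 1)
    else run_end

-- body of the for-idx loop: the two assignments into resolved_points[idx]
def aUpdate (run_candidate : Option String) (run_length min_run : Int) (d : PvPt) : PvPt :=
  if run_candidate = none then
    (d.insert "state" none).insert "support_status" (some "unassigned")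
  else if run_length ≥ min_run then
    (d.insert "state" run_candidate).insert "support_status" (some "accepted")
  else
    (d.insert "state" none).insert "support_status" (some "withheld")

-- for idx in range(run_start, run_end): mutate resolved_points[idx]
-- (count = run_end - run_start iterations)
def aAssignLoop (pts : List PvPt) (run_candidate : Option String)
    (run_length min_run : Int) (idx : Nat) (count : Nat) : List PvPt :=
  match count with
  | 0 => pts
  | c + 1 =>
    aAssignLoop (pts.set idx (aUpdate run_candidate run_length min_run
        (pts.getD idx PySem.Dict.empty))) run_candidate run_length min_run (idx + 1) c

-- outer while loop over run_start (fuel = length of the list, always enough: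
-- run_start strictly increases each iteration)
def aOuter (pts : List PvPt) (min_run : Int) (run_start : Nat) (fuel : Nat) : List PvPt :=
  match fuel with
  | 0 => pts
  | f + 1 =>
    if run_start < pts.length then
      let run_candidate := pvCand (pts.getD run_start PySem.Dict.empty)
      let run_end := aFindRunEnd pts run_candidate pts.length (run_start + 1)
      let run_length : Int := (run_end : Int) - (run_start : Int)
      aOuter (aAssignLoop pts run_candidate run_length min_run run_start (run_end - run_start))
        min_run run_end f
    else pts

def apply_persistence_acceptance (candidate_points : List (List (String × Option String))) (min_run : Int) : List (List (String × Option String)) :=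
  if min_run < 1 then []  -- Python raises ValueError here; excluded by Pre_
  else
    ((aOuter (candidate_points.map PySem.Dict.ofList) min_run 0
        (candidate_points.map PySem.Dict.ofList).length).map (fun d => d.items))

-- ===== PORT B =====
-- p.get("candidate_state")
def bKey (d : PvPt) : Option String := (PySem.Dict.get? d "candidate_state").getD none

-- forward scan: left[i] = left[i-1]+1 if keys[i]==keys[i-1] else 1
-- (prev = keys[i-1], plen = left[i-1])
def bLeftAux : Option String → Nat → List (Option String) → List Nat
  | _, _, [] => []
  | prev, plen, k :: rest =>
    if k = prev then (plen + 1) :: bLeftAux k (plen + 1) rest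
    else 1 :: bLeftAux k 1 rest

def bLeft : List (Option String) → List Nat
  | [] => []
  | k :: rest => 1 :: bLeftAux k 1 rest

-- backward scan: right[i] = right[i+1]+1 if keys[i]==keys[i+1] else 1
def bRight : List (Option String) → List Nat
  | [] => []
  | [_] => [1]
  | k :: k' :: rest =>
    let rs := bRight (k' :: rest)
    (if k = k' then rs.headD 0 + 1 else 1) :: rs

-- _resolve(key, run_len, min_run, p)
def bResolve (key : Option String) (run_len min_run : Int) (p : PvPt) : PvPt :=
  match key with
  | none => (p.insert "state" none).insert "support_status" (some "unassigned")
  | some s =>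
      if run_len ≥ min_run then (p.insert "state" (some s)).insert "support_status" (some "accepted")
      else (p.insert "state" none).insert "support_status" (some "withheld")

-- the final zip comprehension: run_len = l + r - 1
def bResolveAll : List PvPt → List (Option String) → List Nat → List Nat → Int → List PvPt
  | p :: ps, k :: ks, l :: ls, r :: rs, mr =>
      bResolve k ((l : Int) + (r : Int) - 1) mr p :: bResolveAll ps ks ls rs mr
  | _, _, _, _, _ => []

def apply_persistence_acceptance_alt (candidate_points : List (List (String × Option String))) (min_run : Int) : List (List (String × Option String)) :=
  if min_run < 1 then []  -- Python raises ValueError here; excluded by Pre_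
  else
    let pts := candidate_points.map PySem.Dict.ofList
    let keys := pts.map bKey
    (bResolveAll pts keys (bLeft keys) (bRight keys) min_run).map (fun d => d.items)

-- ===== PRECONDITION & SPEC =====
-- Pre_ excludes exactly min_run < 1, where the Python A (and B) raises ValueError.
def Pre_apply_persistence_acceptance (candidate_points : List (List (String × Option String))) (min_run : Int) : Prop := 1 ≤ min_run
instance (candidate_points : List (List (String × Option String))) (min_run : Int) : Decidable (Pre_apply_persistence_acceptance candidate_points min_run) := by unfold Pre_apply_persistence_acceptance; infer_instance
def pvWitness_apply_persistence_acceptance : (List (List (String × Option String))) × Int := ([[("candidate_state", some "x")], [("candidate_state", none)]], 2)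

def Spec_apply_persistence_acceptance (candidate_points : List (List (String × Option String))) (min_run : Int) (out : List (List (String × Option String))) : Prop := out = apply_persistence_acceptance_alt candidate_points min_run
instance (candidate_points : List (List (String × Option String))) (min_run : Int) (out : List (List (String × Option String))) : Decidable (Spec_apply_persistence_acceptance candidate_points min_run out) := by unfold Spec_apply_persistence_acceptance; infer_instance

-- ===== CLAIM (what is proved, stated in full; the proofs are below) =====
def Claim_equal_apply_persistence_acceptance : Prop := ∀ (candidate_points : List (List (String × Option String))) (min_run : Int), Dom_apply_persistence_acceptance candidate_points min_run → Pre_apply_persistence_acceptance candidate_points min_run → Spec_apply_persistence_acceptance candidate_points min_run (apply_persistence_acceptance candidate_points min_run)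

-- ===== LEMMAS AND PROOFS =====

-- proof-only middle ground: the run decomposition both algorithms compute through
def cGroupStep (p : PvPt) (acc : List (List PvPt)) : List (List PvPt) :=
  match acc with
  | (q :: g) :: rest => if bKey p == bKey q then (p :: q :: g) :: rest else [p] :: (q :: g) :: rest
  | _ => [[p]]

def cRuns (pts : List PvPt) : List (List PvPt) := pts.foldr cGroupStep []

def cProcess (pts : List PvPt) (min_run : Int) : List PvPt :=
  (cRuns pts).flatMap (fun run =>
    run.map (bResolve (bKey (run.headD PySem.Dict.empty)) ((run.length : Int)) min_run))

theorem bKey_eq_pvCand (d : PvPt) : bKey d = pvCand d := rfl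

theorem pv_getD_append (pre : List PvPt) (q : PvPt) (suf : List PvPt) (d : PvPt) :
    (pre ++ q :: suf).getD pre.length d = q := by
  induction pre with
  | nil => rfl
  | cons x xs ih => simpa using ih

theorem pv_set_append (pre : List PvPt) (x : PvPt) (t : List PvPt) (y : PvPt) :
    (pre ++ x :: t).set pre.length y = pre ++ y :: t := by
  induction pre with
  | nil => rfl
  | cons a as ih => simpa using ih

theorem aFindRunEnd_spec (rc : Option String) :
    ∀ (suf pre : List PvPt) (fuel : Nat), suf.length ≤ fuel →
      aFindRunEnd (pre ++ suf) rc fuel pre.length =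
        pre.length + (suf.takeWhile (fun q => pvCand q == rc)).length := by
  intro suf
  induction suf with
  | nil =>
      intro pre fuel _
      match fuel with
      | 0 => simp [aFindRunEnd]
      | f + 1 => simp [aFindRunEnd]
  | cons q suf' ih =>
      intro pre fuel hf
      match fuel with
      | 0 => simp at hf
      | f + 1 =>
        show aFindRunEnd (pre ++ q :: suf') rc (f + 1) pre.length = _
        unfold aFindRunEnd
        have hlt : pre.length < (pre ++ q :: suf').length := by simp
        rw [if_pos hlt, pv_getD_append]
        by_cases hq : pvCand q = rc
        · have hne : ¬ (pvCand q ≠ rc) := by simpa using hq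
          rw [if_neg hne]
          have h1 : pre.length + 1 = (pre ++ [q]).length := by simp
          have h2 : pre ++ q :: suf' = (pre ++ [q]) ++ suf' := by simp
          have hf' : suf'.length ≤ f := by simp at hf; omega
          rw [h1, h2, ih (pre ++ [q]) f hf']
          simp [hq]
          omega
        · rw [if_pos hq]
          simp [hq]

theorem aAssignLoop_spec (rc : Option String) (rl mr : Int) :
    ∀ (run pre rest : List PvPt),
      aAssignLoop (pre ++ run ++ rest) rc rl mr pre.length run.length =
        pre ++ run.map (aUpdate rc rl mr) ++ rest := by
  intro run
  induction run with
  | nil =>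
      intro pre rest
      simp [aAssignLoop]
  | cons x run' ih =>
      intro pre rest
      show aAssignLoop (pre ++ x :: run' ++ rest) rc rl mr pre.length (run'.length + 1) = _
      unfold aAssignLoop
      have hget : (pre ++ (x :: run') ++ rest).getD pre.length PySem.Dict.empty = x := by
        rw [List.append_assoc, List.cons_append, pv_getD_append]
      have hset : (pre ++ (x :: run') ++ rest).set pre.length (aUpdate rc rl mr x) =
          (pre ++ [aUpdate rc rl mr x]) ++ run' ++ rest := by
        rw [List.append_assoc, List.cons_append, pv_set_append]; simp
      rw [hget, hset]
      have h1 : pre.length + 1 = (pre ++ [aUpdate rc rl mr x]).length := by simp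
      rw [h1, ih (pre ++ [aUpdate rc rl mr x]) rest]
      simp

theorem bResolve_eq_aUpdate (c : Option String) (n mr : Int) (p : PvPt) :
    bResolve c n mr p = aUpdate c n mr p := by
  cases c <;> simp [bResolve, aUpdate]

theorem cRuns_cons :
    ∀ (rest : List PvPt) (p : PvPt),
      cRuns (p :: rest) =
        (p :: rest.takeWhile (fun q => bKey q == bKey p)) ::
          cRuns (rest.dropWhile (fun q => bKey q == bKey p)) := by
  intro rest
  induction rest with
  | nil => intro p; simp [cRuns, cGroupStep]
  | cons q rest' ih =>
      intro p
      have hstep : cRuns (p :: q :: rest') = cGroupStep p (cRuns (q :: rest')) := rfl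
      rw [hstep, ih q]
      simp only [cGroupStep]
      by_cases h : bKey q = bKey p
      · simp [h]
      · have h1 : (bKey q == bKey p) = false := by simpa using h
        have h2 : (bKey p == bKey q) = false := by
          simp
          exact fun e => h e.symm
        simp [h1, h2, List.takeWhile_cons, List.dropWhile_cons, ih q]

theorem aOuter_eq_cProcess (mr : Int) :
    ∀ (fuel : Nat) (todo : List PvPt), todo.length ≤ fuel → ∀ (done : List PvPt),
      aOuter (done ++ todo) mr done.length fuel = done ++ cProcess todo mr := by
  intro fuel
  induction fuel with
  | zero =>
      intro todo hlen done
      have : todo = [] := List.eq_nil_of_length_eq_zero (Nat.le_zero.mp hlen)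
      subst this
      simp [aOuter, cProcess, cRuns]
  | succ f ih =>
      intro todo hlen done
      match todo with
      | [] => simp [aOuter, cProcess, cRuns]
      | p :: rest =>
          show aOuter (done ++ p :: rest) mr done.length (f + 1) = _
          unfold aOuter
          have hlt : done.length < (done ++ p :: rest).length := by simp
          rw [if_pos hlt]
          simp only
          rw [pv_getD_append]
          set rc := pvCand p with hrc
          set t := rest.takeWhile (fun q => pvCand q == rc) with ht
          set dr := rest.dropWhile (fun q => pvCand q == rc) with hdr
          have hre : aFindRunEnd (done ++ p :: rest) rc (done ++ p :: rest).length
              (done.length + 1) = done.length + 1 + t.length := by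
            have h1 : done.length + 1 = (done ++ [p]).length := by simp
            have h2 : done ++ p :: rest = (done ++ [p]) ++ rest := by simp
            rw [h1, h2, aFindRunEnd_spec rc rest (done ++ [p])
              (((done ++ [p]) ++ rest).length) (by simp; omega)]
          rw [hre]
          have hsplit : (p :: rest : List PvPt) = (p :: t) ++ dr := by
            simp [ht, hdr]
          have hcount : done.length + 1 + t.length - done.length = (p :: t).length := by
            simp; omega
          set rl : Int := ((done.length + 1 + t.length : Nat) : Int) - (done.length : Int) with hrl
          have hassign : aAssignLoop (done ++ p :: rest) rc rl mr
              done.length (done.length + 1 + t.length - done.length) =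
              done ++ (p :: t).map (aUpdate rc rl mr) ++ dr := by
            rw [hcount, hsplit, ← List.append_assoc]
            exact aAssignLoop_spec rc rl mr (p :: t) done dr
          rw [hassign]
          set done' := done ++ (p :: t).map (aUpdate rc rl mr) with hdone'
          have hlen' : done.length + 1 + t.length = done'.length := by
            simp [hdone'] <;> omega
          have hdrlen : dr.length ≤ f := by
            rw [hdr]
            have := List.length_dropWhile_le (fun q => pvCand q == rc) rest
            simp at hlen
            omega
          rw [hlen']
          have := ih dr hdrlen done'
          rw [this]
          have hb : cProcess (p :: rest) mr =
              (p :: t).map (aUpdate rc rl mr) ++ cProcess dr mr := by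
            unfold cProcess
            rw [show cRuns (p :: rest) = (p :: t) :: cRuns dr by
              rw [cRuns_cons rest p]
              simp only [bKey_eq_pvCand, ← hrc, ← ht, ← hdr]]
            rw [List.flatMap_cons]
            congr 1
            have hkey : bKey ((p :: t).headD PySem.Dict.empty) = rc := by
              simp [bKey_eq_pvCand, hrc]
            rw [hkey]
            apply List.map_congr_left
            intro q _
            rw [bResolve_eq_aUpdate]
            congr 1
            simp only [hrl, List.length_cons]
            push_cast
            omega
          rw [hb, hdone']
          simp

-- ascending [s, s+1, …, s+n-1] and descending [n, n-1, …, 1]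
def ascN : Nat → Nat → List Nat
  | _, 0 => []
  | s, n + 1 => s :: ascN (s + 1) n

def descN : Nat → List Nat
  | 0 => []
  | n + 1 => (n + 1) :: descN n

theorem bLeftAux_restart (prev : Option String) (plen : Nat) :
    ∀ (ks : List (Option String)),
      (match ks with | [] => True | k' :: _ => k' ≠ prev) →
      bLeftAux prev plen ks = bLeft ks := by
  intro ks h
  match ks with
  | [] => rfl
  | k' :: rest => simp only [bLeftAux, bLeft, if_neg h]

theorem bLeftAux_rep (k : Option String) :
    ∀ (n m : Nat) (rest : List (Option String)),
      bLeftAux k m (List.replicate n k ++ rest) = ascN (m + 1) n ++ bLeftAux k (m + n) rest := by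
  intro n
  induction n with
  | zero => intro m rest; simp [ascN]
  | succ n' ih =>
      intro m rest
      rw [List.replicate_succ, List.cons_append]
      rw [show bLeftAux k m (k :: (List.replicate n' k ++ rest)) =
            (m + 1) :: bLeftAux k (m + 1) (List.replicate n' k ++ rest) from by
          simp [bLeftAux]]
      rw [ih (m + 1) rest]
      have harith : m + 1 + n' = m + (n' + 1) := by omega
      rw [harith]
      simp [ascN]

theorem bLeft_run (k : Option String) (n : Nat) (rest : List (Option String))
    (h : match rest with | [] => True | k' :: _ => k' ≠ k) :
    bLeft (List.replicate (n + 1) k ++ rest) = ascN 1 (n + 1) ++ bLeft rest := by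
  rw [List.replicate_succ, List.cons_append]
  show (1 :: bLeftAux k 1 (List.replicate n k ++ rest)) = _
  rw [bLeftAux_rep k n 1 rest, bLeftAux_restart k (1 + n) rest h]
  simp [ascN]

theorem bRight_run (k : Option String) :
    ∀ (n : Nat) (rest : List (Option String)),
      (match rest with | [] => True | k' :: _ => k' ≠ k) →
      bRight (List.replicate (n + 1) k ++ rest) = descN (n + 1) ++ bRight rest := by
  intro n
  induction n with
  | zero =>
      intro rest h
      match rest with
      | [] => simp [bRight, descN]
      | k' :: rs =>
          simp only [List.replicate_succ, List.replicate_zero, List.cons_append,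
            List.nil_append]
          show bRight (k :: k' :: rs) = _
          have hne : k' ≠ k := h
          simp only [bRight, descN, if_neg (Ne.symm hne)]
          simp [descN]
  | succ n' ih =>
      intro rest h
      have hrw : List.replicate (n' + 2) k ++ rest =
          k :: (List.replicate (n' + 1) k ++ rest) := by
        rw [List.replicate_succ, List.cons_append]
      rw [hrw]
      have hrw2 : List.replicate (n' + 1) k ++ rest = k :: (List.replicate n' k ++ rest) := by
        rw [List.replicate_succ, List.cons_append]
      rw [hrw2]
      show bRight (k :: k :: (List.replicate n' k ++ rest)) = _
      simp only [bRight, if_pos rfl]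
      rw [← hrw2, ih rest h]
      simp [descN]

theorem bResolveAll_run (mr : Int) :
    ∀ (n : Nat) (t ps' : List PvPt) (k : Option String) (a : Nat)
      (ks' : List (Option String)) (ls' rs' : List Nat),
      t.length = n → (∀ q ∈ t, bKey q = k) →
      bResolveAll (t ++ ps') (List.replicate n k ++ ks') (ascN a n ++ ls') (descN n ++ rs') mr
        = t.map (bResolve k ((a : Int) + (n : Int) - 1) mr) ++ bResolveAll ps' ks' ls' rs' mr := by
  intro n
  induction n with
  | zero =>
      intro t ps' k a ks' ls' rs' hlen _
      have : t = [] := List.eq_nil_of_length_eq_zero hlen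
      subst this
      simp [ascN, descN]
  | succ n' ih =>
      intro t ps' k a ks' ls' rs' hlen hk
      match t with
      | p :: t' =>
          have hlen' : t'.length = n' := by simpa using hlen
          rw [List.replicate_succ]
          show bResolveAll (p :: (t' ++ ps')) (k :: (List.replicate n' k ++ ks'))
              ((a :: ascN (a + 1) n') ++ ls') (((n' + 1) :: descN n') ++ rs') mr = _
          simp only [List.cons_append]
          show bResolve k ((a : Int) + ((n' + 1 : Nat) : Int) - 1) mr p ::
              bResolveAll (t' ++ ps') (List.replicate n' k ++ ks')
                (ascN (a + 1) n' ++ ls') (descN n' ++ rs') mr = _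
          rw [ih t' ps' k (a + 1) ks' ls' rs' hlen' (fun q hq => hk q (List.mem_cons_of_mem _ hq))]
          have harg : ((a + 1 : Nat) : Int) + (n' : Int) - 1 = (a : Int) + ((n' + 1 : Nat) : Int) - 1 := by
            push_cast; ring
          rw [harg]
          simp [List.map_cons]

theorem dropWhile_head_not (p : PvPt → Bool) :
    ∀ (l : List PvPt),
      (match l.dropWhile p with | [] => True | x :: _ => p x = false) := by
  intro l
  induction l with
  | nil => simp [List.dropWhile]
  | cons x xs ih =>
      by_cases h : p x
      · simpa [List.dropWhile, h] using ih
      · simp [List.dropWhile, h]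

theorem bAll_eq_cProcess (mr : Int) :
    ∀ (fuel : Nat) (pts : List PvPt), pts.length ≤ fuel →
      bResolveAll pts (pts.map bKey) (bLeft (pts.map bKey)) (bRight (pts.map bKey)) mr
        = cProcess pts mr := by
  intro fuel
  induction fuel with
  | zero =>
      intro pts hlen
      have : pts = [] := List.eq_nil_of_length_eq_zero (Nat.le_zero.mp hlen)
      subst this
      simp [bResolveAll, cProcess, cRuns, bLeft, bRight]
  | succ f ih =>
      intro pts hlen
      match pts with
      | [] => simp [bResolveAll, cProcess, cRuns, bLeft, bRight]
      | p :: rest =>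
          set k := bKey p with hkdef
          set t := rest.takeWhile (fun q => bKey q == k) with ht
          set dr := rest.dropWhile (fun q => bKey q == k) with hdr
          have hsplit : rest = t ++ dr := (List.takeWhile_append_dropWhile).symm
          have htk : ∀ q ∈ t, bKey q = k := by
            intro q hq
            have := List.mem_takeWhile_imp (ht ▸ hq)
            simpa using this
          have hmapt : t.map bKey = List.replicate t.length k := by
            apply List.eq_replicate_iff.mpr
            constructor
            · simp
            · intro b hb
              obtain ⟨q, hq, rfl⟩ := List.mem_map.mp hb
              exact htk q hq
          have hkeys : (p :: rest).map bKey =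
              List.replicate (t.length + 1) k ++ dr.map bKey := by
            rw [List.map_cons, hsplit, List.map_append, hmapt, List.replicate_succ]
            simp
            rfl
          have hbound : (match dr.map bKey with | [] => True | k' :: _ => k' ≠ k) := by
            have hthis := dropWhile_head_not (fun q => bKey q == k) rest
            rw [← hdr] at hthis
            cases hm : dr with
            | nil => simp
            | cons q ds =>
                rw [hm] at hthis
                have hq : (bKey q == k) = false := hthis
                simpa using hq
          have hleft : bLeft ((p :: rest).map bKey) =
              ascN 1 (t.length + 1) ++ bLeft (dr.map bKey) := by
            rw [hkeys]; exact bLeft_run k t.length (dr.map bKey) hbound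
          have hright : bRight ((p :: rest).map bKey) =
              descN (t.length + 1) ++ bRight (dr.map bKey) := by
            rw [hkeys]; exact bRight_run k t.length (dr.map bKey) hbound
          have hpts : (p :: rest : List PvPt) = (p :: t) ++ dr := by
            rw [hsplit]; simp
          have hdrlen : dr.length ≤ f := by
            have h1 := List.length_dropWhile_le (fun q => bKey q == k) rest
            rw [← hdr] at h1
            simp at hlen
            omega
          rw [hleft, hright, hkeys]
          have hlt : (p :: t).length = t.length + 1 := by simp
          have := bResolveAll_run mr (t.length + 1) (p :: t) dr k 1
            (dr.map bKey) (bLeft (dr.map bKey)) (bRight (dr.map bKey))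
            hlt (by intro q hq; rcases List.mem_cons.mp hq with h | h
                    · subst h; rfl
                    · exact htk q h)
          rw [hpts, this, ih dr hdrlen, List.cons_append, ← hsplit]
          rw [show ((1 : Nat) : Int) + ((t.length + 1 : Nat) : Int) - 1 =
              ((t.length + 1 : Nat) : Int) from by push_cast; ring]
          have hc : cProcess (p :: rest) mr =
              (p :: t).map (bResolve k ((t.length + 1 : Nat) : Int) mr) ++ cProcess dr mr := by
            unfold cProcess
            rw [show cRuns (p :: rest) = (p :: t) :: cRuns dr from cRuns_cons rest p]
            rw [List.flatMap_cons]
            have hh : bKey ((p :: t).headD PySem.Dict.empty) = k := rfl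
            rw [hh]
            simp
          rw [hc]

-- ===== VERDICT (by name: the statement is the Claim_ definition above) =====
theorem apply_persistence_acceptance_spec : Claim_equal_apply_persistence_acceptance := by
  intro cps mr _hdom _hpre
  unfold Spec_apply_persistence_acceptance
  unfold apply_persistence_acceptance apply_persistence_acceptance_alt
  by_cases h : mr < 1
  · rw [if_pos h, if_pos h]
  · rw [if_neg h, if_neg h]
    simp only
    rw [bAll_eq_cProcess mr (cps.map PySem.Dict.ofList).length (cps.map PySem.Dict.ofList) (le_refl _)]
    have := aOuter_eq_cProcess mr (cps.map PySem.Dict.ofList).length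
      (cps.map PySem.Dict.ofList) (le_refl _) []
    simp only [List.nil_append, List.length_nil] at this
    rw [this]
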